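-- pv_equiv track=rewrite | github.com/BaochaiXue/Newton | phystwin_bridge/tools/other/render_overlay_1x3_diff_mp4.py | _circle_offsets
-- ===== SOURCE A (Python) =====
-- def _circle_offsets(radius: int) -> list[tuple[int, int]]:
--     radius = int(max(0, radius))
--     if radius == 0:
--         return [(0, 0)]
--     r_sq = radius * radius
--     offsets: list[tuple[int, int]] = []
--     for dy in range(-radius, radius + 1):
--         for dx in range(-radius, radius + 1):
--             if dx * dx + dy * dy <= r_sq:
--                 offsets.append((dy, dx))
--     return offsets
-- ===== SOURCE B (Python) =====
-- def _circle_offsets(radius: int) -> list[tuple[int, int]]: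
--     radius = int(max(0, radius))
--     r_sq = radius * radius
--     # Pass 1: row half-widths for dy = 0..radius, found by a two-pointer
--     # descent (m only ever shrinks as dy grows), no per-cell test.
--     rows: list[int] = []
--     m = radius
--     for dy in range(0, radius + 1):
--         while m * m + dy * dy > r_sq:
--             m -= 1
--         rows.append(m)
--     # Pass 2: emit each row as one contiguous dx interval, mirrored via abs(dy).
--     offsets: list[tuple[int, int]] = []
--     for dy in range(-radius, radius + 1):
--         m = rows[abs(dy)]
--         offsets.extend((dy, dx) for dx in range(-m, m + 1))
--     return offsets
-- ===== Notes on version B (the rewrite author's own statement) =====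
-- stated objective: alternative
-- what changed: B replaces A's per-cell membership test over the full (2r+1)x(2r+1) grid by a two-pass scheme: a two-pointer descent computes each row's half-width once (the half-width only shrinks as |dy| grows), then each row is emitted as one contiguous dx interval mirrored via abs(dy).
import Mathlib
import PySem

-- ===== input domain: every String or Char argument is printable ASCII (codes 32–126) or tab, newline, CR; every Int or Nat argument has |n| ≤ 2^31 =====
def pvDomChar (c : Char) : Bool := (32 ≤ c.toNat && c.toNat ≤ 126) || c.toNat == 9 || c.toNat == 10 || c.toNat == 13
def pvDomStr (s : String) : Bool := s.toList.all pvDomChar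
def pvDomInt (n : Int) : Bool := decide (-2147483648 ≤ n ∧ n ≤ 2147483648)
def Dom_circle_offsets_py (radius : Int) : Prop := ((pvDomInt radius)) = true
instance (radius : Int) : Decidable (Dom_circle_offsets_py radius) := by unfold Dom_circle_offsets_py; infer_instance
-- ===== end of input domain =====

-- B changes the algorithm: row half-widths come from a two-pointer descent (one pass over dy ≥ 0),
-- and each row is emitted as one contiguous dx interval, instead of testing every grid cell.

-- ===== PORT A =====
def circle_offsets_py (radius : Int) : List (Int × Int) :=
  let r : Int := max 0 radius
  if r = 0 then [(0, 0)]
  else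
    let r_sq := r * r
    (PySem.List.pyRange (-r) (r + 1)).foldl (fun offsets dy =>
      (PySem.List.pyRange (-r) (r + 1)).foldl (fun offsets dx =>
        if dx * dx + dy * dy ≤ r_sq then offsets ++ [(dy, dx)] else offsets) offsets) []

-- ===== PORT B =====
-- 'while m*m + dysq > r_sq: m -= 1'; the fuel argument only makes the loop total, B always passes enough.
def pvShrink (r_sq dysq : Int) : Int → Nat → Int
  | m, 0 => m
  | m, fuel + 1 => if r_sq < m * m + dysq then pvShrink r_sq dysq (m - 1) fuel else m

def circle_offsets_py_alt (radius : Int) : List (Int × Int) :=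
  let r : Int := max 0 radius
  let r_sq := r * r
  let st := (PySem.List.pyRange 0 (r + 1)).foldl
      (fun (st : Int × List Int) dy =>
        let m := pvShrink r_sq (dy * dy) st.1 (st.1 + 1).toNat
        (m, st.2 ++ [m])) (r, [])
  let rows := st.2
  (PySem.List.pyRange (-r) (r + 1)).foldl (fun offsets dy =>
    -- rows[abs(dy)]: the index is always in range, so the default is never used
    let m := PySem.List.pyGetD rows |dy| 0
    offsets ++ (PySem.List.pyRange (-m) (m + 1)).map (fun dx => (dy, dx))) []

-- ===== PRECONDITION & SPEC =====
def Spec_circle_offsets_py (radius : Int) (out : List (Int × Int)) : Prop := out = circle_offsets_py_alt radius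
instance (radius : Int) (out : List (Int × Int)) : Decidable (Spec_circle_offsets_py radius out) := by unfold Spec_circle_offsets_py; infer_instance

-- ===== CLAIM (what is proved, stated in full; the proofs are below) =====
def Claim_equal_circle_offsets_py : Prop := ∀ (radius : Int), Dom_circle_offsets_py radius → Spec_circle_offsets_py radius (circle_offsets_py radius)

-- ===== LEMMAS AND PROOFS =====

-- the true half-width of row dy inside radius r
def pvW (r dy : Int) : Int := (Nat.sqrt (r * r - dy * dy).toNat : Int)

theorem pvW_nonneg (r dy : Int) : 0 ≤ pvW r dy := by
  simp [pvW]

theorem pvW_bracket (r dy : Int) (h : dy * dy ≤ r * r) :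
    pvW r dy * pvW r dy + dy * dy ≤ r * r ∧ r * r < (pvW r dy + 1) * (pvW r dy + 1) + dy * dy := by
  have hnn : (0:Int) ≤ r * r - dy * dy := by omega
  have h1 := Nat.sqrt_le' (r * r - dy * dy).toNat
  have h2 := Nat.lt_succ_sqrt' (r * r - dy * dy).toNat
  constructor
  · have : ((Nat.sqrt (r * r - dy * dy).toNat ^ 2 : Nat) : Int) ≤ ((r * r - dy * dy).toNat : Int) := by
      exact_mod_cast h1
    simp [pvW]
    push_cast at this ⊢
    nlinarith [this, Int.toNat_of_nonneg hnn]
  · have : ((r * r - dy * dy).toNat : Int) < ((Nat.sqrt (r * r - dy * dy).toNat).succ ^ 2 : Nat) := by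
      exact_mod_cast h2
    simp [pvW]
    push_cast at this
    nlinarith [this, Int.toNat_of_nonneg hnn]

theorem pvW_le (r dy : Int) (hr : 0 ≤ r) (h : dy * dy ≤ r * r) : pvW r dy ≤ r := by
  obtain ⟨h1, h2⟩ := pvW_bracket r dy h
  nlinarith [pvW_nonneg r dy]

theorem pvW_anti (r dy : Int) (h0 : 0 ≤ dy) : pvW r (dy + 1) ≤ pvW r dy := by
  have : (r * r - (dy + 1) * (dy + 1)).toNat ≤ (r * r - dy * dy).toNat := by
    apply Int.toNat_le_toNat; nlinarith
  unfold pvW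
  exact_mod_cast Nat.sqrt_le_sqrt this

theorem pvW_abs (r dy : Int) : pvW r |dy| = pvW r dy := by
  simp [pvW, abs_mul_abs_self]

-- pvShrink reaches the bracketed value
theorem pvShrink_eq (r_sq dysq : Int) (t : Int) (ht0 : 0 ≤ t)
    (htle : t * t + dysq ≤ r_sq) (htgt : r_sq < (t + 1) * (t + 1) + dysq) :
    ∀ (fuel : Nat) (m : Int), t ≤ m → (m - t).toNat ≤ fuel →
      pvShrink r_sq dysq m fuel = t := by
  intro fuel
  induction fuel with
  | zero =>
    intro m hm hf
    have : m = t := by omega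
    simp [pvShrink, this]
  | succ n ih =>
    intro m hm hf
    by_cases hc : r_sq < m * m + dysq
    · have htm : t < m := by
        rcases lt_or_eq_of_le hm with h | h
        · exact h
        · exfalso; rw [← h] at hc; omega
      have : pvShrink r_sq dysq m (n + 1) = pvShrink r_sq dysq (m - 1) n := by
        simp [pvShrink, hc]
      rw [this]
      exact ih (m - 1) (by omega) (by omega)
    · push Not at hc
      have : m = t := by
        by_contra hne
        have : t + 1 ≤ m := by omega
        nlinarith
      subst this
      simp [pvShrink]
      intro h
      omega

-- the rows loop produces the map of pvW, carrying the shrinking pointer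
theorem rowsLoop (r : Int) (hr : 0 ≤ r) :
    ∀ (n : Nat) (a : Int), 0 ≤ a → a + n = r + 1 →
      ∀ (m0 : Int) (acc : List Int), pvW r a ≤ m0 →
      ((PySem.List.pyRange a (r + 1)).foldl
        (fun (st : Int × List Int) dy =>
          let m := pvShrink (r * r) (dy * dy) st.1 (st.1 + 1).toNat
          (m, st.2 ++ [m])) (m0, acc)).2
      = acc ++ (PySem.List.pyRange a (r + 1)).map (pvW r) := by
  intro n
  induction n with
  | zero =>
    intro a ha hsum m0 acc hm
    have : r + 1 ≤ a := by omega
    rw [PySem.List.pyRange_one_eq_nil this]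
    simp
  | succ k ih =>
    intro a ha hsum m0 acc hm
    have halt : a < r + 1 := by omega
    rw [PySem.List.pyRange_one_cons halt]
    simp only [List.foldl_cons, List.map_cons]
    have hda : a * a ≤ r * r := by nlinarith
    obtain ⟨hb1, hb2⟩ := pvW_bracket r a hda
    have hstep : pvShrink (r * r) (a * a) m0 (m0 + 1).toNat = pvW r a := by
      apply pvShrink_eq (r * r) (a * a) (pvW r a) (pvW_nonneg r a) hb1 hb2 _ m0 hm
      have := pvW_nonneg r a
      omega
    rw [hstep]
    by_cases hend : a + 1 ≤ r
    · have := ih (a + 1) (by omega) (by omega) (pvW r a) (acc ++ [pvW r a]) (pvW_anti r a ha)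
      simpa using this
    · have : r + 1 ≤ a + 1 := by omega
      rw [PySem.List.pyRange_one_eq_nil this]
      simp

-- A's inner row is the contiguous interval of half-width pvW
theorem rowFilter (r dy : Int) (hr : 0 ≤ r) (hdy : dy * dy ≤ r * r) :
    (PySem.List.pyRange (-r) (r + 1)).filter (fun dx => decide (dx * dx + dy * dy ≤ r * r))
      = PySem.List.pyRange (-(pvW r dy)) (pvW r dy + 1) := by
  set t := pvW r dy with hT
  obtain ⟨hb1, hb2⟩ := pvW_bracket r dy hdy
  have ht0 : 0 ≤ t := pvW_nonneg r dy
  have htr : t ≤ r := pvW_le r dy hr hdy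
  have key : ∀ dx : Int, (dx * dx + dy * dy ≤ r * r) ↔ (-t ≤ dx ∧ dx ≤ t) := by
    intro dx
    constructor
    · intro h
      constructor
      · by_contra hc; push Not at hc
        have : t + 1 ≤ -dx := by omega
        nlinarith
      · by_contra hc; push Not at hc
        have : t + 1 ≤ dx := by omega
        nlinarith
    · intro ⟨h1, h2⟩
      nlinarith
  rw [PySem.List.pyRange_one_append (-r) (-t) (r + 1) (by omega) (by omega),
      PySem.List.pyRange_one_append (-t) (t + 1) (r + 1) (by omega) (by omega)]
  rw [List.filter_append, List.filter_append]
  have e1 : (PySem.List.pyRange (-r) (-t)).filter (fun dx => decide (dx * dx + dy * dy ≤ r * r)) = [] := by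
    rw [List.filter_eq_nil_iff]
    intro x hx
    rw [PySem.List.mem_pyRange_one] at hx
    simp only [decide_eq_true_eq, key]
    omega
  have e2 : (PySem.List.pyRange (-t) (t + 1)).filter (fun dx => decide (dx * dx + dy * dy ≤ r * r)) = PySem.List.pyRange (-t) (t + 1) := by
    rw [List.filter_eq_self]
    intro x hx
    rw [PySem.List.mem_pyRange_one] at hx
    simp only [decide_eq_true_eq, key]
    omega
  have e3 : (PySem.List.pyRange (t + 1) (r + 1)).filter (fun dx => decide (dx * dx + dy * dy ≤ r * r)) = [] := by
    rw [List.filter_eq_nil_iff]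
    intro x hx
    rw [PySem.List.mem_pyRange_one] at hx
    simp only [decide_eq_true_eq, key]
    omega
  rw [e1, e2, e3]
  simp

-- ===== VERDICT (by name: the statement is the Claim_ definition above) =====
theorem circle_offsets_py_spec : Claim_equal_circle_offsets_py := by
  intro radius _
  unfold Spec_circle_offsets_py circle_offsets_py circle_offsets_py_alt
  set r : Int := max 0 radius with hrdef
  have hr : 0 ≤ r := le_max_left 0 radius
  by_cases h0 : r = 0
  · simp only [h0]
    decide
  · have hr1 : 1 ≤ r := by omega
    simp only [if_neg h0]
    -- rows = map of pvW
    have hw0 : pvW r 0 ≤ r := pvW_le r 0 hr (by nlinarith)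
    have hrows := rowsLoop r hr (r + 1).toNat 0 le_rfl (by omega) r [] hw0
    -- A's inner loop becomes append-of-filtered-row
    have hA : ∀ (dy : Int) (acc : List (Int × Int)),
        (PySem.List.pyRange (-r) (r + 1)).foldl
          (fun o dx => if dx * dx + dy * dy ≤ r * r then o ++ [(dy, dx)] else o) acc
        = acc ++ ((PySem.List.pyRange (-r) (r + 1)).filter
            (fun dx => decide (dx * dx + dy * dy ≤ r * r))).map (fun dx => (dy, dx)) := by
      intro dy acc
      rw [show (fun (o : List (Int × Int)) dx => if dx * dx + dy * dy ≤ r * r then o ++ [(dy, dx)] else o)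
            = (fun (o : List (Int × Int)) dx => if (decide (dx * dx + dy * dy ≤ r * r)) = true then o ++ [(dy, dx)] else o)
          from by funext o dx; simp]
      exact PySem.List.foldl_append_if _ _ _ _
    rw [hrows]
    simp only [List.nil_append]
    -- both outer loops append the same contiguous row for every dy
    have hboth : ∀ (acc : List (Int × Int)), ∀ dy ∈ PySem.List.pyRange (-r) (r + 1),
        (PySem.List.pyRange (-r) (r + 1)).foldl
          (fun o dx => if dx * dx + dy * dy ≤ r * r then o ++ [(dy, dx)] else o) acc
        = acc ++ (PySem.List.pyRange (-(PySem.List.pyGetD ((PySem.List.pyRange 0 (r + 1)).map (pvW r)) |dy| 0))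
            (PySem.List.pyGetD ((PySem.List.pyRange 0 (r + 1)).map (pvW r)) |dy| 0 + 1)).map (fun dx => (dy, dx)) := by
      intro acc dy hmem
      rw [PySem.List.mem_pyRange_one] at hmem
      have habs : |dy| ≤ r := by rw [abs_le]; omega
      have hdy2 : dy * dy ≤ r * r := by nlinarith [abs_nonneg dy, sq_abs dy, abs_le.mp habs]
      have hget : PySem.List.pyGetD ((PySem.List.pyRange 0 (r + 1)).map (pvW r)) |dy| 0 = pvW r dy := by
        have hn : ((r + 1).toNat : Int) = r + 1 := by omega
        have hk : ((|dy|.toNat : Nat) : Int) = |dy| := by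
          exact Int.toNat_of_nonneg (abs_nonneg dy)
        have hlt : |dy|.toNat < (r + 1).toNat := by omega
        have := PySem.List.pyGetD_map_pyRange (pvW r) (r + 1).toNat |dy|.toNat 0 hlt
        rw [hn, hk] at this
        rw [this, pvW_abs]
      rw [hget, hA dy acc, rowFilter r dy hr hdy2]
    rw [PySem.List.foldl_congr_mem _ _ _ _ hboth]
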